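-- pv_equiv track=rewrite | github.com/AumitLeon/advent-of-code-2024 | day8/solution.py | get_antinodes_2
-- ===== SOURCE A (Python) =====
-- from typing import List, Tuple, Dict
--
-- def is_out_of_bounds(row: int, column: int, matrix: List[List[str]]) -> bool:
--     matrix_column_dimension = len(matrix[0])
--     matrix_row_dimension = len(matrix)
--     if (
--         0 > column
--         or column > matrix_column_dimension - 1
--         or 0 > row
--         or row > matrix_row_dimension - 1
--     ):
--         return True
--     else:
--         return False
--
-- def get_antinodes_2(
--     current_coord: Tuple[int, int],
--     compare_coord: Tuple[int, int],
--     matrix: List[List[str]],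
-- ) -> List[Tuple[int, int]]:
--     row1, col1 = current_coord
--     row2, col2 = compare_coord
--
--     abs_row = abs(row1 - row2)
--     abs_col = abs(col1 - col2)
--     antinodes = []
--     temp_row1 = row1
--     temp_row2 = row2
--     temp_col1 = col1
--     temp_col2 = col2
--     antinodes.append(current_coord)
--     antinodes.append(compare_coord)
--     if row1 < row2 and col1 > col2:
--         temp_row1 = temp_row1 - abs_row
--         temp_col1 = temp_col1 + abs_col
--         temp_row2 = temp_row2 + abs_row
--         temp_col2 = temp_col2 - abs_col
--
--         while not is_out_of_bounds(
--             temp_row1, temp_col1, matrix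
--         ) or not is_out_of_bounds(temp_row2, temp_col2, matrix):
--             if not is_out_of_bounds(temp_row1, temp_col1, matrix):
--                 antinodes.append((temp_row1, temp_col1))
--                 temp_row1 = temp_row1 - abs_row
--                 temp_col1 = temp_col1 + abs_col
--
--             if not is_out_of_bounds(temp_row2, temp_col2, matrix):
--                 antinodes.append((temp_row2, temp_col2))
--                 temp_row2 = temp_row2 + abs_row
--                 temp_col2 = temp_col2 - abs_col
--
--     elif row1 < row2 and col1 < col2:
--         temp_row1 = temp_row1 - abs_row
--         temp_col1 = temp_col1 - abs_col
--         temp_row2 = temp_row2 + abs_row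
--         temp_col2 = temp_col2 + abs_col
--         while not is_out_of_bounds(
--             temp_row1, temp_col1, matrix
--         ) or not is_out_of_bounds(temp_row2, temp_col2, matrix):
--             if not is_out_of_bounds(temp_row1, temp_col1, matrix):
--                 antinodes.append((temp_row1, temp_col1))
--                 temp_row1 = temp_row1 - abs_row
--                 temp_col1 = temp_col1 - abs_col
--
--             if not is_out_of_bounds(temp_row2, temp_col2, matrix):
--                 antinodes.append((temp_row2, temp_col2))
--                 temp_row2 = temp_row2 + abs_row
--                 temp_col2 = temp_col2 + abs_col
--     return antinodes
-- ===== SOURCE B (Python) =====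
-- def _ray(r, c, dr, dc, matrix):
--     rows, cols = len(matrix), len(matrix[0])
--     pts = []
--     while 0 <= r < rows and 0 <= c < cols:
--         pts.append((r, c))
--         r += dr
--         c += dc
--     return pts
--
--
-- def get_antinodes_2(current_coord, compare_coord, matrix):
--     row1, col1 = current_coord
--     row2, col2 = compare_coord
--     antinodes = [current_coord, compare_coord]
--     if row1 < row2 and col1 != col2:
--         dr, dc = row1 - row2, col1 - col2
--         ray1 = _ray(row1 + dr, col1 + dc, dr, dc, matrix)
--         ray2 = _ray(row2 - dr, col2 - dc, -dr, -dc, matrix)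
--         antinodes += [p for pair in zip(ray1, ray2) for p in pair]
--         antinodes += ray1[len(ray2):] + ray2[len(ray1):]
--     return antinodes
-- ===== Notes on version B (the rewrite author's own statement) =====
-- stated objective: simpler
-- what changed: Replaces A's two duplicated stateful while-loops (two cursors advanced and frozen inside one loop, with sign-specialised copies per column direction) by one branch that computes the step as the coordinate difference, builds each outward ray independently with a single helper, and interleaves the two rays.
import Mathlib
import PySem

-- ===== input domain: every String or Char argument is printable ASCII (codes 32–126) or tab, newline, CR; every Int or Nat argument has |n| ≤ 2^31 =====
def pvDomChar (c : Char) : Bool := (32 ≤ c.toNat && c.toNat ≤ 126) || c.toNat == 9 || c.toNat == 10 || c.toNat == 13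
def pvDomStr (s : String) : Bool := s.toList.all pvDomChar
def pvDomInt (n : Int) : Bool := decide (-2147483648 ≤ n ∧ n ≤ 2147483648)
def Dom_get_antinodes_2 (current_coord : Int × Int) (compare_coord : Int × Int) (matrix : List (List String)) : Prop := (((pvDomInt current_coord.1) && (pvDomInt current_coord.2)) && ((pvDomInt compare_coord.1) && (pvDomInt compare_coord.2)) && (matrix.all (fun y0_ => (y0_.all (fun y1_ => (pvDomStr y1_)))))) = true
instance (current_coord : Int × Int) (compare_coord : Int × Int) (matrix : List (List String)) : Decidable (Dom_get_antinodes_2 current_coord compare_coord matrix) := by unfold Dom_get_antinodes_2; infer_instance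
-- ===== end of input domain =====

-- B replaces A's duplicated stateful while-loops (two frozen cursors advanced in one loop)
-- by building the two rays independently and interleaving them; objective: simpler.

-- ===== PORT A =====
-- Python is_out_of_bounds; Python reads matrix[0], which raises IndexError on an empty
-- matrix — those inputs are excluded by Pre_; headD [] is exact on nonempty matrices.
def oobA (row col : Int) (matrix : List (List String)) : Bool :=
  let mcd : Int := ((matrix.headD []).length : Int)
  let mrd : Int := (matrix.length : Int)
  decide (0 > col) || decide (col > mcd - 1) || decide (0 > row) || decide (row > mrd - 1)

-- A's while loop (both branches share this shape, differing only in the step deltas,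
-- passed here as dr1 dc1 dr2 dc2): each iteration appends-and-steps each cursor that is
-- still in bounds, leaving an out-of-bounds cursor frozen.  fuel is an upper bound on the
-- iteration count (each iteration steps at least one cursor through one of the ≤ matrix.length
-- in-bounds rows of its strictly monotone row sequence), so the loop never exhausts it.
def loopA (fuel : Nat) (r1 c1 r2 c2 dr1 dc1 dr2 dc2 : Int)
    (matrix : List (List String)) : List (Int × Int) :=
  match fuel with
  | 0 => []
  | f + 1 =>
    if !oobA r1 c1 matrix || !oobA r2 c2 matrix then
      if !oobA r1 c1 matrix then
        if !oobA r2 c2 matrix then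
          (r1, c1) :: (r2, c2) :: loopA f (r1 + dr1) (c1 + dc1) (r2 + dr2) (c2 + dc2) dr1 dc1 dr2 dc2 matrix
        else
          (r1, c1) :: loopA f (r1 + dr1) (c1 + dc1) r2 c2 dr1 dc1 dr2 dc2 matrix
      else
        if !oobA r2 c2 matrix then
          (r2, c2) :: loopA f r1 c1 (r2 + dr2) (c2 + dc2) dr1 dc1 dr2 dc2 matrix
        else []
    else []

def get_antinodes_2 (current_coord : Int × Int) (compare_coord : Int × Int) (matrix : List (List String)) : List (Int × Int) :=
  let row1 := current_coord.1
  let col1 := current_coord.2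
  let row2 := compare_coord.1
  let col2 := compare_coord.2
  let abs_row : Int := ((row1 - row2).natAbs : Int)
  let abs_col : Int := ((col1 - col2).natAbs : Int)
  let fuel : Nat := 2 * matrix.length + 4
  if row1 < row2 ∧ col1 > col2 then
    current_coord :: compare_coord ::
      loopA fuel (row1 - abs_row) (col1 + abs_col) (row2 + abs_row) (col2 - abs_col)
        (-abs_row) abs_col abs_row (-abs_col) matrix
  else if row1 < row2 ∧ col1 < col2 then
    current_coord :: compare_coord ::
      loopA fuel (row1 - abs_row) (col1 - abs_col) (row2 + abs_row) (col2 + abs_col)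
        (-abs_row) (-abs_col) abs_row abs_col matrix
  else
    [current_coord, compare_coord]

-- ===== PORT B =====
-- B's _ray: march from (r,c) by (dr,dc), collecting in-bounds points, stop at first
-- out-of-bounds point (same fuel bound; a ray has at most matrix.length points).
def rayB (fuel : Nat) (r c dr dc : Int) (matrix : List (List String)) : List (Int × Int) :=
  match fuel with
  | 0 => []
  | f + 1 =>
    let rows : Int := (matrix.length : Int)
    let cols : Int := ((matrix.headD []).length : Int)
    if decide (0 ≤ r) && decide (r < rows) && decide (0 ≤ c) && decide (c < cols) then
      (r, c) :: rayB f (r + dr) (c + dc) dr dc matrix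
    else []

-- B's interleave: zipped pairs flattened, then the leftover tail of the longer ray.
def interB (xs ys : List (Int × Int)) : List (Int × Int) :=
  ((xs.zip ys).flatMap fun p => [p.1, p.2]) ++ xs.drop ys.length ++ ys.drop xs.length

def get_antinodes_2_alt (current_coord : Int × Int) (compare_coord : Int × Int) (matrix : List (List String)) : List (Int × Int) :=
  let row1 := current_coord.1
  let col1 := current_coord.2
  let row2 := compare_coord.1
  let col2 := compare_coord.2
  if row1 < row2 ∧ col1 ≠ col2 then
    let dr := row1 - row2
    let dc := col1 - col2
    let fuel : Nat := 2 * matrix.length + 4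
    let ray1 := rayB fuel (row1 + dr) (col1 + dc) dr dc matrix
    let ray2 := rayB fuel (row2 - dr) (col2 - dc) (-dr) (-dc) matrix
    current_coord :: compare_coord :: interB ray1 ray2
  else
    [current_coord, compare_coord]

-- ===== PRECONDITION & SPEC =====
-- Pre_ excludes exactly the inputs where Python A raises IndexError (matrix[0] on an
-- empty matrix, reached only when the diagonal branch fires); B raises there too.
def Pre_get_antinodes_2 (current_coord : Int × Int) (compare_coord : Int × Int) (matrix : List (List String)) : Prop :=
  (current_coord.1 < compare_coord.1 ∧ current_coord.2 ≠ compare_coord.2) → matrix ≠ []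
instance (current_coord : Int × Int) (compare_coord : Int × Int) (matrix : List (List String)) : Decidable (Pre_get_antinodes_2 current_coord compare_coord matrix) := by unfold Pre_get_antinodes_2; infer_instance

def pvWitness_get_antinodes_2 : (Int × Int) × (Int × Int) × List (List String) :=
  ((0, 2), (1, 1), [["."], ["."], ["."], ["."]])

def Spec_get_antinodes_2 (current_coord : Int × Int) (compare_coord : Int × Int) (matrix : List (List String)) (out : List (Int × Int)) : Prop := out = get_antinodes_2_alt current_coord compare_coord matrix
instance (current_coord : Int × Int) (compare_coord : Int × Int) (matrix : List (List String)) (out : List (Int × Int)) : Decidable (Spec_get_antinodes_2 current_coord compare_coord matrix out) := by unfold Spec_get_antinodes_2; infer_instance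

-- ===== CLAIM (what is proved, stated in full; the proofs are below) =====
def Claim_equal_get_antinodes_2 : Prop := ∀ (current_coord : Int × Int) (compare_coord : Int × Int) (matrix : List (List String)), Dom_get_antinodes_2 current_coord compare_coord matrix → Pre_get_antinodes_2 current_coord compare_coord matrix → Spec_get_antinodes_2 current_coord compare_coord matrix (get_antinodes_2 current_coord compare_coord matrix)

-- ===== LEMMAS AND PROOFS =====

-- B's in-bounds test is the negation of A's out-of-bounds test.
theorem inb_eq_not_oob (r c : Int) (m : List (List String)) :
    (decide (0 ≤ r) && decide (r < (m.length : Int)) && decide (0 ≤ c)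
      && decide (c < ((m.headD []).length : Int))) = !oobA r c m := by
  simp only [oobA, Bool.not_or, ← decide_not, ← Bool.decide_and]
  rw [decide_eq_decide]
  omega

-- one-step unfoldings keeping the oobA guard intact
theorem rayB_succ (f : Nat) (r c dr dc : Int) (m : List (List String)) :
    rayB (f + 1) r c dr dc m
      = if oobA r c m then [] else (r, c) :: rayB f (r + dr) (c + dc) dr dc m := by
  simp only [rayB, inb_eq_not_oob]
  by_cases h : oobA r c m <;> simp [h]

theorem rayB_oob (fuel : Nat) (r c dr dc : Int) (m : List (List String))
    (h : oobA r c m = true) : rayB fuel r c dr dc m = [] := by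
  cases fuel with
  | zero => rfl
  | succ f => rw [rayB_succ, if_pos h]

theorem interB_nil_left (ys : List (Int × Int)) : interB [] ys = ys := by
  simp [interB]

theorem interB_nil_right (xs : List (Int × Int)) : interB xs [] = xs := by
  simp [interB]

theorem interB_cons_cons (a b : Int × Int) (xs ys : List (Int × Int)) :
    interB (a :: xs) (b :: ys) = a :: b :: interB xs ys := by
  simp [interB]

-- A's loop is the interleaving of the two rays (same fuel on both sides).
theorem loopA_eq_inter (fuel : Nat) (r1 c1 r2 c2 dr1 dc1 dr2 dc2 : Int)
    (m : List (List String)) :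
    loopA fuel r1 c1 r2 c2 dr1 dc1 dr2 dc2 m
      = interB (rayB fuel r1 c1 dr1 dc1 m) (rayB fuel r2 c2 dr2 dc2 m) := by
  induction fuel generalizing r1 c1 r2 c2 with
  | zero => simp [loopA, rayB, interB]
  | succ f ih =>
    by_cases h1 : oobA r1 c1 m = true <;> by_cases h2 : oobA r2 c2 m = true
    · simp [loopA, rayB_succ, h1, h2, interB_nil_left]
    · have h2' : oobA r2 c2 m = false := by simp_all
      simp [loopA, rayB_succ, h1, h2', ih, rayB_oob f r1 c1 dr1 dc1 m h1, interB_nil_left]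
    · have h1' : oobA r1 c1 m = false := by simp_all
      simp [loopA, rayB_succ, h1', h2, ih, rayB_oob f r2 c2 dr2 dc2 m h2, interB_nil_right]
    · have h1' : oobA r1 c1 m = false := by simp_all
      have h2' : oobA r2 c2 m = false := by simp_all
      simp [loopA, rayB_succ, h1', h2', ih, interB_cons_cons]

-- ===== VERDICT (by name: the statement is the Claim_ definition above) =====
theorem get_antinodes_2_spec : Claim_equal_get_antinodes_2 := by
  intro cc dd m _ _
  unfold Spec_get_antinodes_2
  obtain ⟨r1, c1⟩ := cc
  obtain ⟨r2, c2⟩ := dd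
  simp only [get_antinodes_2, get_antinodes_2_alt]
  by_cases hr : r1 < r2
  · by_cases hgt : c1 > c2
    · have hne : c1 ≠ c2 := by omega
      simp only [hr, hgt, hne, and_self, if_true, true_and, ne_eq, not_false_eq_true,
        loopA_eq_inter]
      rw [show r1 - ((r1 - r2).natAbs : Int) = r1 + (r1 - r2) from by omega,
          show c1 + ((c1 - c2).natAbs : Int) = c1 + (c1 - c2) from by omega,
          show r2 + ((r1 - r2).natAbs : Int) = r2 - (r1 - r2) from by omega,
          show c2 - ((c1 - c2).natAbs : Int) = c2 - (c1 - c2) from by omega,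
          show -((r1 - r2).natAbs : Int) = r1 - r2 from by omega,
          show -((c1 - c2).natAbs : Int) = -(c1 - c2) from by omega,
          show ((r1 - r2).natAbs : Int) = -(r1 - r2) from by omega,
          show ((c1 - c2).natAbs : Int) = c1 - c2 from by omega]
    · by_cases hlt : c1 < c2
      · have hne : c1 ≠ c2 := by omega
        simp only [hr, hgt, hlt, hne, and_self, if_true, if_false, true_and, ne_eq,
          not_false_eq_true, loopA_eq_inter]
        rw [show r1 - ((r1 - r2).natAbs : Int) = r1 + (r1 - r2) from by omega,
            show c1 - ((c1 - c2).natAbs : Int) = c1 + (c1 - c2) from by omega,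
            show r2 + ((r1 - r2).natAbs : Int) = r2 - (r1 - r2) from by omega,
            show c2 + ((c1 - c2).natAbs : Int) = c2 - (c1 - c2) from by omega,
            show -((r1 - r2).natAbs : Int) = r1 - r2 from by omega,
            show -((c1 - c2).natAbs : Int) = c1 - c2 from by omega,
            show ((r1 - r2).natAbs : Int) = -(r1 - r2) from by omega,
            show ((c1 - c2).natAbs : Int) = -(c1 - c2) from by omega]
      · have heq : c1 = c2 := by omega
        simp [hr, heq]
  · simp [hr]
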